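-- pv_equiv track=rewrite | github.com/elastic/ai-github-actions | scripts/extract-log-errors.py | coalesce_blocks
-- ===== SOURCE A (Python) =====
-- def coalesce_blocks(matched_lines: set[int], line_count: int, context: int) -> list[tuple[int, int]]:
--     blocks: list[tuple[int, int]] = []
--     for lineno in sorted(matched_lines):
--         start = max(0, lineno - context)
--         end = min(line_count - 1, lineno + context)
--         if blocks and start <= blocks[-1][1] + 1:
--             blocks[-1] = (blocks[-1][0], end)
--         else:
--             blocks.append((start, end))
--     return blocks
-- ===== SOURCE B (Python) =====
-- def coalesce_blocks(matched_lines, line_count, context):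
--     ls = sorted(matched_lines)
--     if not ls:
--         return []
--     def gap(a, b):
--         # the clamped context windows around lines a and b do not touch
--         return min(line_count - 1, a + context) + 1 < max(0, b - context)
--     pairs = list(zip(ls, ls[1:]))
--     starts = [ls[0]] + [b for a, b in pairs if gap(a, b)]
--     lasts = [a for a, b in pairs if gap(a, b)] + [ls[-1]]
--     return [(max(0, s - context), min(line_count - 1, e + context))
--             for s, e in zip(starts, lasts)]
-- ===== Notes on version B (the rewrite author's own statement) =====
-- stated objective: alternative
-- what changed: B computes the block boundaries declaratively: it zips consecutive sorted lines, filters the pairs whose clamped context windows do not touch into a list of block-starting lines and a list of block-ending lines, then zips the two lists and clamps each pair - no running accumulator that merges into or mutates a last block.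
import Mathlib
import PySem

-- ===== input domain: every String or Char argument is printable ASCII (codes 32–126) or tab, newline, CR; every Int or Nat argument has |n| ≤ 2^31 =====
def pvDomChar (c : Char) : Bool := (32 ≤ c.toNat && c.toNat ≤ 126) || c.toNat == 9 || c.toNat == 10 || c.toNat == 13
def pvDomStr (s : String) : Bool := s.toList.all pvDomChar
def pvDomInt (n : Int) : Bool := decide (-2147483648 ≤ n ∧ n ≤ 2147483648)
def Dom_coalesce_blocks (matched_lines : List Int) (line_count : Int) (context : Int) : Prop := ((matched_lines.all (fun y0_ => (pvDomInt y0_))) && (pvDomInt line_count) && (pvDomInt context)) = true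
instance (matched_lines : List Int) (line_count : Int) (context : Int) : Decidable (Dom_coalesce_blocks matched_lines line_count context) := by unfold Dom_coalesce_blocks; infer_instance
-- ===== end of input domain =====

-- B computes block boundaries declaratively: it zips consecutive sorted lines, filters the pairs whose clamped windows do not touch into block-start and block-end line lists, zips them and clamps — no running accumulator mutating a last block (alternative structure, same cost).


-- ===== PORT A =====
-- A: fold over sorted(matched_lines), keeping the list of blocks; blocks[-1] is read
-- via getLast? and overwritten via dropLast ++ [_], exactly as the Python mutates it.
def coalesce_blocks (matched_lines : List Int) (line_count : Int) (context : Int) : List (Int × Int) :=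
  (PySem.List.sorted matched_lines (fun x => x) false).foldl
    (fun blocks lineno =>
      let start := max 0 (lineno - context)
      let «end» := min (line_count - 1) (lineno + context)
      match blocks.getLast? with
      | some last =>
          if start ≤ last.2 + 1 then blocks.dropLast ++ [(last.1, «end»)]
          else blocks ++ [(start, «end»)]
      | none => blocks ++ [(start, «end»)]) []

-- ===== PORT B =====
-- gap a b: the clamped windows around lines a and b do not touch (Source B's helper `gap`)
def cbGap (line_count context a b : Int) : Bool :=
  decide (min (line_count - 1) (a + context) + 1 < max 0 (b - context))

-- literal transliteration of Source B: sorted lines, consecutive pairs, filter the gap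
-- pairs into start/last line lists, zip and clamp
def coalesce_blocks_alt (matched_lines : List Int) (line_count : Int) (context : Int) : List (Int × Int) :=
  match PySem.List.sorted matched_lines (fun x => x) false with
  | [] => []
  | x :: rest =>
      let pairs := (x :: rest).zip rest
      let starts := x :: (pairs.filter (fun p => cbGap line_count context p.1 p.2)).map Prod.snd
      let lasts := (pairs.filter (fun p => cbGap line_count context p.1 p.2)).map Prod.fst ++ [rest.getLastD x]
      (starts.zip lasts).map (fun p => (max 0 (p.1 - context), min (line_count - 1) (p.2 + context)))

-- ===== PRECONDITION & SPEC =====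
def Spec_coalesce_blocks (matched_lines : List Int) (line_count : Int) (context : Int) (out : List (Int × Int)) : Prop := out = coalesce_blocks_alt matched_lines line_count context
instance (matched_lines : List Int) (line_count : Int) (context : Int) (out : List (Int × Int)) : Decidable (Spec_coalesce_blocks matched_lines line_count context out) := by unfold Spec_coalesce_blocks; infer_instance

-- ===== CLAIM (what is proved, stated in full; the proofs are below) =====
def Claim_equal_coalesce_blocks : Prop := ∀ (matched_lines : List Int) (line_count : Int) (context : Int), Dom_coalesce_blocks matched_lines line_count context → Spec_coalesce_blocks matched_lines line_count context (coalesce_blocks matched_lines line_count context)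

-- ===== LEMMAS AND PROOFS =====
-- the clamped window of a line
def cbClamp (line_count context lineno : Int) : Int × Int :=
  (max 0 (lineno - context), min (line_count - 1) (lineno + context))

-- proof-side reference grouping: consume a maximal chain of touching windows
def cbRun : Int → List (Int × Int) → Int × List (Int × Int)
  | e, [] => (e, [])
  | e, p :: rest => if p.1 ≤ e + 1 then cbRun p.2 rest else (e, p :: rest)

theorem cbRun_length (e : Int) (ivs : List (Int × Int)) : (cbRun e ivs).2.length ≤ ivs.length := by
  induction ivs generalizing e with
  | nil => simp [cbRun]
  | cons p rest ih =>
      simp only [cbRun]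
      by_cases h : p.1 ≤ e + 1
      · simp only [h, if_pos]
        exact le_trans (ih p.2) (Nat.le_succ _)
      · simp [h]

def cbBlocks : List (Int × Int) → List (Int × Int)
  | [] => []
  | p :: rest =>
      (p.1, (cbRun p.2 rest).1) :: cbBlocks (cbRun p.2 rest).2
  termination_by ivs => ivs.length
  decreasing_by
    exact Nat.lt_succ_of_le (cbRun_length _ _)

-- A's step, expressed on an already-clamped interval
def aStep (blocks : List (Int × Int)) (p : Int × Int) : List (Int × Int) :=
  match blocks.getLast? with
  | some last =>
      if p.1 ≤ last.2 + 1 then blocks.dropLast ++ [(last.1, p.2)]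
      else blocks ++ [p]
  | none => blocks ++ [p]

-- Invariant for A: folding A's step over the remaining intervals with accumulator
-- blocks ++ [(s,e)] produces blocks followed by the reference grouping.
theorem foldl_eq_blocks (ivs : List (Int × Int)) :
    ∀ (blocks : List (Int × Int)) (s e : Int),
      ivs.foldl aStep (blocks ++ [(s, e)])
        = blocks ++ (s, (cbRun e ivs).1) :: cbBlocks (cbRun e ivs).2 := by
  induction ivs with
  | nil => intro blocks s e; simp [cbRun, cbBlocks]
  | cons p rest ih =>
      intro blocks s e
      simp only [List.foldl_cons, cbRun]
      rw [show aStep (blocks ++ [(s, e)]) p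
            = if p.1 ≤ e + 1 then blocks ++ [(s, p.2)] else (blocks ++ [(s, e)]) ++ [p] by
          simp [aStep]]
      by_cases h : p.1 ≤ e + 1
      · simp only [h, if_pos]
        exact ih blocks s p.2
      · simp only [h, if_neg, not_false_iff]
        rw [show p = (p.1, p.2) from rfl, ih (blocks ++ [(s, e)]) p.1 p.2]
        simp [cbBlocks]

-- B's core expression on a nonempty sorted list, as defined in the port
def bForm (lc c : Int) (x : Int) (rest : List Int) : List (Int × Int) :=
  let pairs := (x :: rest).zip rest
  let starts := x :: (pairs.filter (fun p => cbGap lc c p.1 p.2)).map Prod.snd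
  let lasts := (pairs.filter (fun p => cbGap lc c p.1 p.2)).map Prod.fst ++ [rest.getLastD x]
  (starts.zip lasts).map (fun p => (max 0 (p.1 - c), min (lc - 1) (p.2 + c)))

-- main bridge: B's declarative form equals the reference grouping
theorem bForm_eq_blocks (lc c : Int) (rest : List Int) :
    ∀ x, bForm lc c x rest
      = cbBlocks (cbClamp lc c x :: rest.map (cbClamp lc c)) := by
  induction rest with
  | nil =>
      intro x
      simp [bForm, cbBlocks, cbRun, cbClamp]
  | cons y rest ih =>
      intro x
      have hpairs : ((x :: y :: rest).zip (y :: rest)) = (x, y) :: ((y :: rest).zip rest) := rfl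
      simp only [List.map_cons]
      by_cases hg : cbGap lc c x y = true
      · -- gap between x and y: (x,y) kept by the filter; block (cs x, ce x) then recurse
        have hrun : cbRun (cbClamp lc c x).2 (cbClamp lc c y :: rest.map (cbClamp lc c))
            = ((cbClamp lc c x).2, cbClamp lc c y :: rest.map (cbClamp lc c)) := by
          have : ¬ (cbClamp lc c y).1 ≤ (cbClamp lc c x).2 + 1 := by
            simp only [cbGap, decide_eq_true_eq] at hg
            simp only [cbClamp]; omega
          simp [cbRun, this]
        have hcb : cbBlocks (cbClamp lc c x :: cbClamp lc c y :: rest.map (cbClamp lc c))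
            = ((cbClamp lc c x).1, (cbClamp lc c x).2)
              :: cbBlocks (cbClamp lc c y :: rest.map (cbClamp lc c)) := by
          rw [cbBlocks, hrun]
        rw [hcb, ← ih y]
        simp only [bForm, hpairs, List.filter_cons, hg, if_pos, List.map_cons,
          List.cons_append, List.zip_cons_cons, List.getLastD_cons, cbClamp]
      · -- no gap: x's block absorbs y's chain; only the first start changes from y to x
        have hle : (cbClamp lc c y).1 ≤ (cbClamp lc c x).2 + 1 := by
          simp only [cbGap, decide_eq_true_eq] at hg
          simp only [cbClamp]; omega
        have hrun : cbRun (cbClamp lc c x).2 (cbClamp lc c y :: rest.map (cbClamp lc c))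
            = cbRun (cbClamp lc c y).2 (rest.map (cbClamp lc c)) := by
          simp [cbRun, hle]
        have hcbx : cbBlocks (cbClamp lc c x :: cbClamp lc c y :: rest.map (cbClamp lc c))
            = ((cbClamp lc c x).1, (cbRun (cbClamp lc c y).2 (rest.map (cbClamp lc c))).1)
              :: cbBlocks (cbRun (cbClamp lc c y).2 (rest.map (cbClamp lc c))).2 := by
          rw [cbBlocks, hrun]
        have hcby : cbBlocks (cbClamp lc c y :: rest.map (cbClamp lc c))
            = ((cbClamp lc c y).1, (cbRun (cbClamp lc c y).2 (rest.map (cbClamp lc c))).1)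
              :: cbBlocks (cbRun (cbClamp lc c y).2 (rest.map (cbClamp lc c))).2 := by
          rw [cbBlocks]
        have hihy := ih y
        rw [hcby] at hihy
        simp only [bForm] at hihy
        rw [hcbx]
        simp only [bForm, hpairs, List.filter_cons, hg, if_neg, Bool.false_eq_true,
          not_false_iff, List.getLastD_cons]
        rcases hL : ((((y :: rest).zip rest).filter (fun p => cbGap lc c p.1 p.2)).map Prod.fst
            ++ [rest.getLastD y]) with _ | ⟨h, t⟩
        · exact absurd hL (by simp)
        · rw [hL] at hihy
          simp only [List.zip_cons_cons, List.map_cons] at hihy ⊢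
          have hhead := (List.cons_eq_cons.mp hihy).1
          have htail := (List.cons_eq_cons.mp hihy).2
          rw [htail]
          have hsnd : min (lc - 1) (h + c)
              = (cbRun (cbClamp lc c y).2 (rest.map (cbClamp lc c))).1 :=
            congrArg Prod.snd hhead
          rw [hsnd]
          simp [cbClamp]

-- ===== VERDICT (by name: the statement is the Claim_ definition above) =====
theorem coalesce_blocks_spec : Claim_equal_coalesce_blocks := by
  intro ml lc c _
  unfold Spec_coalesce_blocks coalesce_blocks coalesce_blocks_alt
  rw [show (fun (blocks : List (Int × Int)) (lineno : Int) =>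
        let start := max 0 (lineno - c)
        let «end» := min (lc - 1) (lineno + c)
        match blocks.getLast? with
        | some last =>
            if start ≤ last.2 + 1 then blocks.dropLast ++ [(last.1, «end»)]
            else blocks ++ [(start, «end»)]
        | none => blocks ++ [(start, «end»)])
      = (fun blocks lineno => aStep blocks (cbClamp lc c lineno)) from rfl]
  cases h : PySem.List.sorted ml (fun x => x) false with
  | nil => simp
  | cons x rest =>
      show _ = bForm lc c x rest
      rw [bForm_eq_blocks lc c rest x]
      have hmap : (x :: rest).foldl (fun blocks lineno => aStep blocks (cbClamp lc c lineno)) []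
          = ((x :: rest).map (cbClamp lc c)).foldl aStep [] := by
        rw [List.foldl_map]
      rw [hmap]
      simp only [List.map_cons, List.foldl_cons]
      rw [show aStep [] (cbClamp lc c x) = [] ++ [((cbClamp lc c x).1, (cbClamp lc c x).2)] by
        simp [aStep]]
      rw [foldl_eq_blocks (rest.map (cbClamp lc c)) [] (cbClamp lc c x).1 (cbClamp lc c x).2]
      simp [cbBlocks]
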